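-- pv_equiv track=rewrite | github.com/chrismclennon/codegames | checkio/electronic-station/long-repeat-inside.py | identify_pattern
-- ===== SOURCE A (Python) =====
-- def identify_pattern(input_string: str) -> str:
--     charset = {input_string[0]}
--     pattern = [input_string[0]]
--     for char in input_string[1:]:
--         if char in charset:
--             return ''.join(pattern)
--         charset.add(char)
--         pattern.append(char)
--     return ''.join(pattern)
-- ===== SOURCE B (Python) =====
-- def identify_pattern(input_string: str) -> str:
--     cut = min((input_string.index(c, input_string.index(c) + 1)
--                for c in set(input_string) if input_string.count(c) > 1),
--               default=len(input_string))
--     return input_string[:cut]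
-- ===== Notes on version B (the rewrite author's own statement) =====
-- stated objective: alternative
-- what changed: Instead of scanning left to right with a seen-set and returning at the first repeat, B computes for every distinct repeated character the index of its second occurrence and cuts the string at the minimum such index (whole string if none).
-- outside the precondition, e.g. on identify_pattern(''): A raises IndexError, B returns ''
-- crash fix: On the empty string A raises IndexError (input_string[0]); B returns the empty string. — e.g. on identify_pattern(""): A raises IndexError, B returns ""
import Mathlib
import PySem

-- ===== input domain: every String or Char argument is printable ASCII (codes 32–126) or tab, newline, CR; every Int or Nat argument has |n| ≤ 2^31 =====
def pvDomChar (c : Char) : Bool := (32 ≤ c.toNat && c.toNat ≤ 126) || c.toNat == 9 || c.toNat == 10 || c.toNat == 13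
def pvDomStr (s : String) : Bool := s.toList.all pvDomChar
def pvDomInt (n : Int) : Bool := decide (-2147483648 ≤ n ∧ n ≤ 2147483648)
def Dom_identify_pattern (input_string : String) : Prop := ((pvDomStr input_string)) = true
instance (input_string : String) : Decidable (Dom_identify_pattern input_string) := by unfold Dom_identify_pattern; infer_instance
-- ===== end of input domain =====

-- B replaces A's left-to-right scan (seen-set + pattern accumulator, early return at the first
-- repeat) by a per-character computation: for every distinct repeated character take the index of
-- its second occurrence and cut the string at the minimum such index; alternative, not faster.

-- ===== PORT A =====
-- the for-loop over input_string[1:] with its two accumulators and early return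
def pvALoop : List Char → PySem.Set Char → List Char → List Char
  | [], _, pattern => pattern
  | c :: rest, charset, pattern =>
    if PySem.Set.contains charset c then pattern
    else pvALoop rest (PySem.Set.add charset c) (pattern ++ [c])

def identify_pattern (input_string : String) : String :=
  match input_string.toList with
  | [] => ""   -- input_string[0] raises IndexError here; excluded by Pre_
  | c0 :: rest => String.ofList (pvALoop rest (PySem.Set.ofList [c0]) [c0])

-- ===== PORT B =====
-- input_string.index(c, input_string.index(c) + 1): first occurrence of the single character c
-- at or after index idxOf c + 1 — exact (= idxOf into the dropped suffix, offset back) whenever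
-- c occurs there, which holds at every use since Source B only evaluates it when count(c) > 1.
def pvSecond (l : List Char) (c : Char) : Nat :=
  let i1 := l.idxOf c
  i1 + 1 + (l.drop (i1 + 1)).idxOf c

def identify_pattern_alt (input_string : String) : String :=
  let l := input_string.toList
  let repeats := ((PySem.Set.ofList l).filter (fun c => 1 < l.count c)).map (pvSecond l)
  -- min(..., default=len): the minimum of a list of Nats with default l.length
  String.ofList (l.take (repeats.foldr min l.length))

-- ===== PRECONDITION & SPEC =====
-- Pre_ excludes only the empty string, on which A raises IndexError at input_string[0].
def Pre_identify_pattern (input_string : String) : Prop := input_string ≠ ""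
instance (input_string : String) : Decidable (Pre_identify_pattern input_string) := by unfold Pre_identify_pattern; infer_instance
def pvWitness_identify_pattern : String := "abcb"

-- On the empty string A raises IndexError (input_string[0]); B returns the empty string.
def Raises_identify_pattern (input_string : String) : Prop := input_string = ""
instance (input_string : String) : Decidable (Raises_identify_pattern input_string) := by unfold Raises_identify_pattern; infer_instance
def pvRaiseWitness_identify_pattern : String := ""
def pvRaiseWitnessOut_identify_pattern : String := ""

def Spec_identify_pattern (input_string : String) (out : String) : Prop := out = identify_pattern_alt input_string
instance (input_string : String) (out : String) : Decidable (Spec_identify_pattern input_string out) := by unfold Spec_identify_pattern; infer_instance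

-- ===== CLAIM (what is proved, stated in full; the proofs are below) =====
def Claim_equal_identify_pattern : Prop := ∀ (input_string : String), Dom_identify_pattern input_string → Pre_identify_pattern input_string → Spec_identify_pattern input_string (identify_pattern input_string)
def Claim_raises_identify_pattern : Prop := (∀ (input_string : String), Dom_identify_pattern input_string → Raises_identify_pattern input_string → ¬ Pre_identify_pattern input_string) ∧ (Dom_identify_pattern (pvRaiseWitness_identify_pattern) ∧ Raises_identify_pattern (pvRaiseWitness_identify_pattern) ∧ identify_pattern_alt (pvRaiseWitness_identify_pattern) = pvRaiseWitnessOut_identify_pattern)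

-- ===== LEMMAS AND PROOFS =====

-- proof-side helper: the first index in js whose character already occurs before it (default length)
def pvFirst (l : List Char) : List Nat → Nat
  | [] => l.length
  | i :: is => if l.getD i ' ' ∈ l.take i then i else pvFirst l is

-- A's loop keeps charset equal (as a list) to pattern; with charset = pattern = pre (nodup) the
-- remaining run returns the prefix of l = pre ++ rest cut at the first repeat index ≥ |pre|.
theorem pv_main (rest : List Char) : ∀ (pre : List Char), pre.Nodup →
    pvALoop rest pre pre
      = (pre ++ rest).take (pvFirst (pre ++ rest) (List.range' pre.length rest.length)) := by
  induction rest with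
  | nil => intro pre _; simp [pvALoop, pvFirst]
  | cons c rest ih =>
    intro pre hnd
    have hget : (pre ++ c :: rest).getD pre.length ' ' = c := by
      simp [List.getD_eq_getElem?_getD]
    have htake : (pre ++ c :: rest).take pre.length = pre := List.take_left
    rw [List.length_cons, List.range'_succ]
    by_cases hc : c ∈ pre
    · simp [pvALoop, pvFirst, PySem.Set.contains, htake, hc]

    · have hadd : PySem.Set.add pre c = pre ++ [c] := by
        simp [PySem.Set.add, PySem.Set.contains, hc]
      have hnd' : (pre ++ [c]).Nodup := by
        refine List.Nodup.append hnd (List.nodup_singleton c) ?_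
        intro a ha hb
        rw [List.mem_singleton] at hb
        exact hc (hb ▸ ha)
      have := ih (pre ++ [c]) hnd'
      simp only [List.append_assoc, List.singleton_append, List.length_append,
        List.length_singleton] at this
      simp [pvALoop, pvFirst, PySem.Set.contains, htake, hc, this]

-- small facts about foldr min (min with a default)
theorem pv_foldr_min_le_init (xs : List Nat) (d : Nat) : xs.foldr min d ≤ d := by
  induction xs with
  | nil => simp
  | cons x xs ih => exact le_trans (min_le_right _ _) ih

theorem pv_foldr_min_le_mem {xs : List Nat} {x : Nat} (d : Nat) (hx : x ∈ xs) :
    xs.foldr min d ≤ x := by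
  induction xs with
  | nil => cases hx
  | cons y ys ih =>
    rcases List.mem_cons.mp hx with h | h
    · exact h ▸ min_le_left _ _
    · exact le_trans (min_le_right _ _) (ih h)

theorem pv_foldr_min_eq_or_mem (xs : List Nat) (d : Nat) :
    xs.foldr min d = d ∨ xs.foldr min d ∈ xs := by
  induction xs with
  | nil => left; rfl
  | cons x xs ih =>
    rcases le_total x (xs.foldr min d) with h | h
    · right; simp [min_eq_left h]
    · have hfold : (x :: xs).foldr min d = xs.foldr min d := by
        simp [min_eq_right h]
      rcases ih with h' | h'
      · left; rw [hfold, h']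
      · right; rw [hfold]; exact List.mem_cons_of_mem _ h'

-- mutual domination makes the two defaulted minima equal
theorem pv_minD_congr {xs ys : List Nat} (d : Nat)
    (h1 : ∀ x ∈ xs, ∃ y ∈ ys, y ≤ x) (h2 : ∀ y ∈ ys, ∃ x ∈ xs, x ≤ y) :
    xs.foldr min d = ys.foldr min d := by
  apply le_antisymm
  · rcases pv_foldr_min_eq_or_mem ys d with h | h
    · rw [h]; exact pv_foldr_min_le_init xs d
    · obtain ⟨x, hx, hle⟩ := h2 _ h
      exact le_trans (pv_foldr_min_le_mem d hx) hle
  · rcases pv_foldr_min_eq_or_mem xs d with h | h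
    · rw [h]; exact pv_foldr_min_le_init ys d
    · obtain ⟨y, hy, hle⟩ := h1 _ h
      exact le_trans (pv_foldr_min_le_mem d hy) hle

-- the first satisfying index of an ascending, bounded index list is its defaulted minimum
theorem pvFirst_eq_min (l : List Char) : ∀ (js : List Nat), js.Pairwise (· ≤ ·) →
    (∀ j ∈ js, j ≤ l.length) →
    pvFirst l js = (js.filter (fun i => decide (l.getD i ' ' ∈ l.take i))).foldr min l.length := by
  intro js
  induction js with
  | nil => intro _ _; rfl
  | cons i is ih =>
    intro hpw hb
    have hpw' := (List.pairwise_cons.mp hpw).2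
    have hle := (List.pairwise_cons.mp hpw).1
    by_cases hp : l.getD i ' ' ∈ l.take i
    · have hp' : l[i]?.getD ' ' ∈ l.take i := by
        simpa [List.getD_eq_getElem?_getD] using hp
      have hge : i ≤ List.foldr min l.length (is.filter (fun i => decide (l[i]?.getD ' ' ∈ l.take i))) := by
        rcases pv_foldr_min_eq_or_mem (is.filter (fun i => decide (l[i]?.getD ' ' ∈ l.take i))) l.length with h | h
        · rw [h]; exact hb i List.mem_cons_self
        · exact hle _ (List.mem_of_mem_filter h)
      simp [pvFirst, hp', min_eq_left hge]
    · have hp' : ¬ (l[i]?.getD ' ' ∈ l.take i) := by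
        simpa [List.getD_eq_getElem?_getD] using hp
      have hih := ih hpw' (fun j hj => hb j (List.mem_cons_of_mem _ hj))
      simp [pvFirst, hp', hih]

-- idxOf is minimal: it is ≤ any index holding the element
theorem pv_idxOf_min (l : List Char) (c : Char) : ∀ (j : Nat) (hj : j < l.length),
    l[j] = c → l.idxOf c ≤ j := by
  induction l with
  | nil => intro j hj; exact absurd hj (by simp)
  | cons a t ih =>
    intro j hj he
    by_cases hac : a = c
    · simp [hac]
    · have hidx : (a :: t).idxOf c = t.idxOf c + 1 := by simp [hac]
      cases j with
      | zero => exact absurd (by simpa using he) hac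
      | succ j =>
        have := ih j (by simpa using hj) (by simpa using he)
        rw [hidx]; omega

-- c does not occur strictly before its first occurrence
theorem pv_not_mem_take_idxOf (l : List Char) (c : Char) : c ∉ l.take (l.idxOf c) := by
  induction l with
  | nil => simp
  | cons a t ih =>
    by_cases hac : a = c
    · simp [hac]
    · have hidx : (a :: t).idxOf c = t.idxOf c + 1 := by simp [hac]
      rw [hidx, List.take_succ_cons]
      intro hmem
      rcases List.mem_cons.mp hmem with h | h
      · exact hac h.symm
      · exact ih h

-- the condition "index i is a repeat position"
theorem pv_mem_S (l : List Char) (i : Nat) :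
    i ∈ (List.range l.length).filter (fun i => decide (l.getD i ' ' ∈ l.take i))
      ↔ i < l.length ∧ l.getD i ' ' ∈ l.take i := by
  simp [List.mem_filter, List.mem_range]

-- every second-occurrence index of a repeated character is itself a repeat position
theorem pv_domR (l : List Char) (c : Char) (hc : c ∈ l) (hcnt : 1 < l.count c) :
    pvSecond l c < l.length ∧ l.getD (pvSecond l c) ' ' ∈ l.take (pvSecond l c) := by
  set i1 := l.idxOf c with hi1def
  have hi1 : i1 < l.length := List.idxOf_lt_length_of_mem hc
  have hget1 : l[i1] = c := List.getElem_idxOf hi1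
  have htk : (l.take (i1 + 1)).count c = 1 := by
    have h1 : l.take (i1 + 1) = l.take i1 ++ [c] := by
      rw [List.take_add_one]
      congr 1
      simp [List.getElem?_eq_getElem hi1, hget1]
    have h0 : (l.take i1).count c = 0 :=
      List.count_eq_zero.mpr (pv_not_mem_take_idxOf l c)
    simp [h1, h0]
  have hsplit : l.count c = (l.take (i1 + 1)).count c + (l.drop (i1 + 1)).count c := by
    conv_lhs => rw [← List.take_append_drop (i1 + 1) l]
    exact List.count_append
  have hdropcnt : 0 < (l.drop (i1 + 1)).count c := by omega
  have hcd : c ∈ l.drop (i1 + 1) := List.count_pos_iff.mp hdropcnt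
  have hj2 : (l.drop (i1 + 1)).idxOf c < (l.drop (i1 + 1)).length :=
    List.idxOf_lt_length_of_mem hcd
  have hlen : (l.drop (i1 + 1)).length = l.length - (i1 + 1) := List.length_drop
  have hsec : pvSecond l c = i1 + 1 + (l.drop (i1 + 1)).idxOf c := by
    simp [pvSecond, ← hi1def]
  have hx : pvSecond l c < l.length := by rw [hsec]; omega
  refine ⟨hx, ?_⟩
  have hgetx : l.getD (pvSecond l c) ' ' = c := by
    rw [List.getD_eq_getElem l ' ' hx]
    have hx' : i1 + 1 + (l.drop (i1 + 1)).idxOf c < l.length := hsec ▸ hx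
    have : l[pvSecond l c]'hx = l[i1 + 1 + (l.drop (i1 + 1)).idxOf c]'hx' := by
      congr 1
    rw [this, ← List.getElem_drop]
    exact List.getElem_idxOf hj2
  rw [hgetx]
  have hi1x : i1 < pvSecond l c := by rw [hsec]; omega
  have h1 : i1 < (l.take (pvSecond l c)).length := by
    simp only [List.length_take]
    exact lt_min hi1x hi1
  have h2 : (l.take (pvSecond l c))[i1]'h1 = c := by
    rw [List.getElem_take]; exact hget1
  have hmem := List.getElem_mem h1
  rw [h2] at hmem
  exact hmem

-- every repeat position is dominated by the second occurrence of its character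
theorem pv_domS (l : List Char) (i : Nat) (hi : i < l.length)
    (hp : l.getD i ' ' ∈ l.take i) :
    ∃ c, c ∈ l ∧ 1 < l.count c ∧ pvSecond l c ≤ i := by
  have hgd : l.getD i ' ' = l[i] := List.getD_eq_getElem l ' ' hi
  rw [hgd] at hp
  set c := l[i]'hi with hcdef
  obtain ⟨j, hjlen, hjval⟩ := List.getElem_of_mem hp
  have hji : j < i := lt_of_lt_of_le hjlen (by simp [List.length_take])
  have hjl : j < l.length := lt_trans hji hi
  have hlj : l[j]'hjl = c := by rw [← hjval, List.getElem_take]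
  refine ⟨c, List.getElem_mem hi, ?_, ?_⟩
  · have hsplit : l.count c = (l.take i).count c + (l.drop i).count c := by
      conv_lhs => rw [← List.take_append_drop i l]
      exact List.count_append
    have h1 : 0 < (l.take i).count c := List.count_pos_iff.mpr hp
    have h2 : 0 < (l.drop i).count c := by
      apply List.count_pos_iff.mpr
      have hd0 : 0 < (l.drop i).length := by simp [List.length_drop]; omega
      have : (l.drop i)[0]'hd0 = c := by
        rw [List.getElem_drop]
        simpa using hcdef.symm
      have hmem := List.getElem_mem hd0
      rw [this] at hmem
      exact hmem
    omega
  · set i1 := l.idxOf c with hi1def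
    have hi1i : i1 < i := lt_of_le_of_lt (pv_idxOf_min l c j hjl hlj) hji
    have hsec : pvSecond l c = i1 + 1 + (l.drop (i1 + 1)).idxOf c := by
      simp [pvSecond, ← hi1def]
    have hd : i - (i1 + 1) < (l.drop (i1 + 1)).length := by
      simp [List.length_drop]; omega
    have hdval : (l.drop (i1 + 1))[i - (i1 + 1)]'hd = c := by
      rw [List.getElem_drop]
      have harith : i1 + 1 + (i - (i1 + 1)) = i := by omega
      have hi' : i1 + 1 + (i - (i1 + 1)) < l.length := by omega
      have : l[i1 + 1 + (i - (i1 + 1))]'hi' = l[i]'hi := by congr 1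
      rw [this]
    have hj2 := pv_idxOf_min (l.drop (i1 + 1)) c _ hd hdval
    rw [hsec]; omega

-- the first repeat index over the whole range equals B's defaulted minimum
theorem pv_assemble (l : List Char) :
    pvFirst l (List.range l.length)
      = (((PySem.Set.ofList l).filter (fun c => 1 < l.count c)).map (pvSecond l)).foldr min l.length := by
  rw [pvFirst_eq_min l (List.range l.length) List.pairwise_le_range
    (fun j hj => le_of_lt (List.mem_range.mp hj))]
  apply pv_minD_congr
  · intro x hx
    rw [pv_mem_S] at hx
    obtain ⟨c, hcl, hcnt, hle⟩ := pv_domS l x hx.1 hx.2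
    refine ⟨pvSecond l c, List.mem_map_of_mem ?_, hle⟩
    exact List.mem_filter.mpr ⟨(PySem.Set.mem_ofList l c).mpr hcl, by simpa using hcnt⟩
  · intro y hy
    obtain ⟨c, hcf, rfl⟩ := List.mem_map.mp hy
    have hcl : c ∈ l := (PySem.Set.mem_ofList l c).mp (List.mem_of_mem_filter hcf)
    have hcnt : 1 < l.count c := by simpa using (List.mem_filter.mp hcf).2
    obtain ⟨hlt, hpred⟩ := pv_domR l c hcl hcnt
    exact ⟨pvSecond l c, (pv_mem_S l _).mpr ⟨hlt, hpred⟩, le_refl _⟩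

-- ===== VERDICT (by name: the statement is the Claim_ definition above) =====
theorem identify_pattern_spec : Claim_equal_identify_pattern := by
  intro s _ hpre
  unfold Spec_identify_pattern
  obtain ⟨c0, rest, hl⟩ : ∃ c0 rest, s.toList = c0 :: rest := by
    cases h : s.toList with
    | nil => exact absurd (String.toList_inj.mp (by simp [h])) hpre
    | cons a l => exact ⟨a, l, rfl⟩
  have hmain := pv_main rest [c0] (by simp)
  simp only [List.singleton_append, List.length_singleton] at hmain
  unfold identify_pattern identify_pattern_alt
  rw [hl]
  have hfirst : pvFirst (c0 :: rest) (List.range (c0 :: rest).length)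
      = pvFirst (c0 :: rest) (List.range' 1 rest.length) := by
    have h0 : List.range (c0 :: rest).length = 0 :: List.range' 1 rest.length := by
      simp [List.range_eq_range', List.range'_succ]
    rw [h0]; simp [pvFirst]
  show String.ofList (pvALoop rest (PySem.Set.ofList [c0]) [c0])
      = String.ofList ((c0 :: rest).take
          (((((PySem.Set.ofList (c0 :: rest)).filter (fun c => 1 < (c0 :: rest).count c)).map
              (pvSecond (c0 :: rest))).foldr min (c0 :: rest).length)))
  have hof : PySem.Set.ofList [c0] = [c0] := rfl
  rw [hof, hmain, ← pv_assemble, hfirst]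

@[simp] theorem identify_pattern_raises : Claim_raises_identify_pattern := by
  unfold Claim_raises_identify_pattern
  exact ⟨fun s _ hr => by simp [Raises_identify_pattern] at hr; simp [hr, Pre_identify_pattern],
    by decide⟩
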